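-- pv_equiv track=rewrite | github.com/hermosa-circulo/hermosa_circulo | app/utils/Cylinder/makeobj.py | returnVN
-- ===== SOURCE A (Python) =====
-- def VectorSubstruction(v1,v2):
--     ans = [0 for i in range(len(v1))]
--     for i in range(len(v1)):
--         ans[i] = v1[i]-v2[i]
--     return ans
--
-- def CrossProduct(a,b):
--     ans = [0 for i in range(len(a))]
--     ans[0] = (a[1]*b[2]-a[2]*b[1])
--     ans[1] = (a[2]*b[0]-a[0]*b[2])
--     ans[2] = (a[0]*b[1]-a[1]*b[0])
--     return ans
--
-- def returnVN(v):
--     vn =[[[0 for i in range(3)]for j in range(len(v[0]))]for k in range(len(v)-1)]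
--     for i in range(len(v)-1):
--         for j in range(len(v[0])):
--             if j == len(v[0])-1:
--                 a = VectorSubstruction(v[i][j],v[i+1][j])
--                 b = VectorSubstruction(v[i][j],v[i][0])
--                 vn[i][j] = CrossProduct(a,b)
--             else:
--                 a = VectorSubstruction(v[i][j],v[i+1][j])
--                 b = VectorSubstruction(v[i][j],v[i][j+1])
--                 vn[i][j] = CrossProduct(a,b)
--     return vn
-- ===== SOURCE B (Python) =====
-- def returnVN(v):
--     m = len(v[0])
--
--     def cross(a, b):
--         return [a[1] * b[2] - a[2] * b[1],
--                 a[2] * b[0] - a[0] * b[2],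
--                 a[0] * b[1] - a[1] * b[0]]
--
--     def normal(p, q, r):
--         # (p-q) x (p-r) = p x q + q x r + r x p  (bilinearity, x cross x = 0):
--         # no subtraction is needed at all.
--         cpq, cqr, crp = cross(p, q), cross(q, r), cross(r, p)
--         return [cpq[k] + cqr[k] + crp[k] for k in range(3)]
--
--     out = []
--     for full0, r1 in zip(v, v[1:]):
--         r0 = full0[:m]
--         rot = r0[1:] + r0[:1]          # row rotated left: the right neighbour of each cell
--         out.append([normal(p, q, r) for p, q, r in zip(r0, r1, rot)])
--     return out
-- ===== Notes on version B (the rewrite author's own statement) =====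
-- stated objective: alternative
-- what changed: B never subtracts vectors: it uses the algebraic identity (p-q)x(p-r) = pxq + qxr + rxp to compute each normal as the sum of three pairwise cross products of the raw vertices, traversing the grid as a triple zip of each row, the next row, and the row rotated left by one (no index loops, no last-column branch).
-- outside the precondition, e.g. on returnVN([[[1, 2, 3, 4]], [[0, 0, 0, 0]]]): A returns [[[0, 0, 0, 0]]], B returns [[[0, 0, 0]]]
import Mathlib
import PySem

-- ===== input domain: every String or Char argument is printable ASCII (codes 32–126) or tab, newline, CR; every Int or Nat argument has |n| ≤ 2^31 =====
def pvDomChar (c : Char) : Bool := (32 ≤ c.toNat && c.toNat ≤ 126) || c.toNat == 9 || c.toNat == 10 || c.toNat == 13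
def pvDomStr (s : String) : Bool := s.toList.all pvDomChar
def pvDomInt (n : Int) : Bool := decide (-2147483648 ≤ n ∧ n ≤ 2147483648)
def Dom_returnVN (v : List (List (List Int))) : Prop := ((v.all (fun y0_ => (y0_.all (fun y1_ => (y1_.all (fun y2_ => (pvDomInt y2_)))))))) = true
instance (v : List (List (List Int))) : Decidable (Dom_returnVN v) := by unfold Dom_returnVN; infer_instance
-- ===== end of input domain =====

-- B computes each normal without any vector subtraction, via the identity
-- (p-q)×(p-r) = p×q + q×r + r×p, summing three pairwise cross products over a triple zip of
-- each row, the next row, and the row rotated left by one (alternative algorithm, same cost).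

-- ===== PORT A =====
-- Indexing inside A is always in range on Pre_; the ports read v1[i] etc. as getD _ default
-- (exact wherever the Python returns).
def VectorSubstruction (v1 v2 : List Int) : List Int :=
  (List.range v1.length).foldl
    (fun ans i => ans.set i (v1.getD i 0 - v2.getD i 0))
    (List.replicate v1.length 0)

def CrossProduct (a b : List Int) : List Int :=
  let ans := List.replicate a.length (0 : Int)
  let ans := ans.set 0 (a.getD 1 0 * b.getD 2 0 - a.getD 2 0 * b.getD 1 0)
  let ans := ans.set 1 (a.getD 2 0 * b.getD 0 0 - a.getD 0 0 * b.getD 2 0)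
  let ans := ans.set 2 (a.getD 0 0 * b.getD 1 0 - a.getD 1 0 * b.getD 0 0)
  ans

def returnVN (v : List (List (List Int))) : List (List (List Int)) :=
  let cols := (v.getD 0 []).length
  let vn := List.replicate (v.length - 1) (List.replicate cols (List.replicate 3 (0 : Int)))
  (List.range (v.length - 1)).foldl (fun vn i =>
    (List.range cols).foldl (fun vn j =>
      if j = cols - 1 then
        let a := VectorSubstruction ((v.getD i []).getD j []) ((v.getD (i+1) []).getD j [])
        let b := VectorSubstruction ((v.getD i []).getD j []) ((v.getD i []).getD 0 [])
        vn.set i ((vn.getD i []).set j (CrossProduct a b))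
      else
        let a := VectorSubstruction ((v.getD i []).getD j []) ((v.getD (i+1) []).getD j [])
        let b := VectorSubstruction ((v.getD i []).getD j []) ((v.getD i []).getD (j+1) [])
        vn.set i ((vn.getD i []).set j (CrossProduct a b))) vn) vn

-- ===== PORT B =====
def pvCross (a b : List Int) : List Int :=
  [a.getD 1 0 * b.getD 2 0 - a.getD 2 0 * b.getD 1 0,
   a.getD 2 0 * b.getD 0 0 - a.getD 0 0 * b.getD 2 0,
   a.getD 0 0 * b.getD 1 0 - a.getD 1 0 * b.getD 0 0]

def pvNormal (p q r : List Int) : List Int :=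
  let cpq := pvCross p q
  let cqr := pvCross q r
  let crp := pvCross r p
  (List.range 3).map (fun k => cpq.getD k 0 + cqr.getD k 0 + crp.getD k 0)

def returnVN_alt (v : List (List (List Int))) : List (List (List Int)) :=
  let m := (v.getD 0 []).length
  (v.zip v.tail).foldl (fun out rr =>
    let r0 := rr.1.take m
    let rot := r0.drop 1 ++ r0.take 1
    out ++ [((r0.zip rr.2).zip rot).map (fun t => pvNormal t.1.1 t.1.2 t.2)]) []

-- ===== PRECONDITION & SPEC =====
-- Pre_ excludes exactly the inputs where Python A raises (empty v; a row shorter than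
-- len(v[0]); an accessed vector too short for the subtraction or the cross product) and, in
-- addition, multi-row inputs whose accessed first-operand vectors are LONGER than 3, on which
-- A returns a cross product padded with trailing zeros to the vector's length — an artefact of
-- A's preallocation that B does not reproduce.
def Pre_returnVN (v : List (List (List Int))) : Prop :=
  v ≠ [] ∧
  (1 < v.length →
    (∀ r ∈ v, (v.getD 0 []).length ≤ r.length) ∧
    (∀ r ∈ v.dropLast, ∀ x ∈ r.take (v.getD 0 []).length, x.length = 3) ∧
    (∀ x ∈ (v.getLastD []).take (v.getD 0 []).length, 3 ≤ x.length))
instance (v : List (List (List Int))) : Decidable (Pre_returnVN v) := by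
  unfold Pre_returnVN; infer_instance

def pvWitness_returnVN : List (List (List Int)) := [[[1, 2, 3]], [[4, 5, 6]]]

def Spec_returnVN (v : List (List (List Int))) (out : List (List (List Int))) : Prop := out = returnVN_alt v
instance (v : List (List (List Int))) (out : List (List (List Int))) : Decidable (Spec_returnVN v out) := by unfold Spec_returnVN; infer_instance

-- ===== CLAIM (what is proved, stated in full; the proofs are below) =====
def Claim_equal_returnVN : Prop := ∀ (v : List (List (List Int))), Dom_returnVN v → Pre_returnVN v → Spec_returnVN v (returnVN v)

-- ===== LEMMAS AND PROOFS =====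

-- Writing each index of a list once, left to right, is a map (plus the untouched tail).
theorem pv_foldl_range_set {α : Type} (h : Nat → α → α) (d : α) :
    ∀ (m : Nat) (l : List α), m ≤ l.length →
      (List.range m).foldl (fun acc i => acc.set i (h i (acc.getD i d))) l
        = (List.range m).map (fun i => h i (l.getD i d)) ++ l.drop m := by
  intro m
  induction m with
  | zero => intro l _; simp
  | succ m ih =>
    intro l hm
    have hmlt : m < l.length := by omega
    rw [List.range_succ, List.foldl_append, List.foldl_cons, List.foldl_nil, ih l (by omega)]
    have hlen : (List.map (fun i => h i (l.getD i d)) (List.range m)).length = m := by simp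
    have hget : ((List.map (fun i => h i (l.getD i d)) (List.range m)) ++ l.drop m).getD m d
        = l.getD m d := by
      rw [List.getD_eq_getElem?_getD, List.getElem?_append_right (by omega), hlen,
        Nat.sub_self, List.getElem?_drop, Nat.add_zero, List.getD_eq_getElem?_getD]
    rw [hget, List.set_append, if_neg (by omega), hlen, Nat.sub_self,
      List.drop_eq_getElem_cons hmlt, List.set_cons_zero]
    simp

-- Repeatedly rewriting slot i of the outer list is one rewrite with the folded row.
theorem pv_foldl_set_at {α : Type} (i : Nat) (d : α) (step : α → Nat → α) :
    ∀ (js : List Nat) (vn : List α),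
      js.foldl (fun vn j => vn.set i (step (vn.getD i d) j)) vn
        = vn.set i (js.foldl step (vn.getD i d)) := by
  intro js
  induction js with
  | nil =>
    intro vn
    by_cases hi : i < vn.length
    · rw [List.foldl_nil, List.foldl_nil, List.getD_eq_getElem vn d hi, List.set_getElem_self]
    · rw [List.foldl_nil, List.foldl_nil, List.set_eq_of_length_le (by omega)]
  | cons j js ih =>
    intro vn
    rw [List.foldl_cons, List.foldl_cons, ih]
    by_cases hi : i < vn.length
    · have hg : (vn.set i (step (vn.getD i d) j)).getD i d = step (vn.getD i d) j := by
        rw [List.getD_eq_getElem _ _ (by simpa using hi)]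
        exact List.getElem_set_self (by simpa using hi)
      rw [hg, List.set_set]
    · have hle : vn.length ≤ i := by omega
      rw [List.set_eq_of_length_le hle, List.set_eq_of_length_le hle,
        List.set_eq_of_length_le (by simpa using hle)]

-- zip(v, v[1:]) enumerated by index.
theorem pv_zip_tail {α : Type} (d : α) :
    ∀ (v : List α), v.zip v.tail
      = (List.range (v.length - 1)).map (fun i => (v.getD i d, v.getD (i + 1) d)) := by
  intro v
  induction v with
  | nil => simp
  | cons a t ih =>
    cases t with
    | nil => simp
    | cons b t' =>
      simp only [List.tail_cons, List.zip_cons_cons] at ih ⊢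
      rw [ih]
      simp only [List.length_cons, Nat.add_sub_cancel]
      rw [List.range_succ_eq_map, List.map_cons, List.map_map]
      simp [Function.comp]

-- Appending one mapped element per step is a map.
theorem pv_foldl_append_map {α β : Type} (f : α → β) :
    ∀ (l : List α) (acc : List β),
      l.foldl (fun out x => out ++ [f x]) acc = acc ++ l.map f := by
  intro l
  induction l with
  | nil => intro acc; simp
  | cons x t ih => intro acc; rw [List.foldl_cons, ih]; simp

-- A triple zip mapped, enumerated by index.
theorem pv_zip3_map {α : Type} (d : α) (f : α → α → α → List Int)
    (xs ys zs : List α) (m : Nat)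
    (hx : xs.length = m) (hy : m ≤ ys.length) (hz : zs.length = m) :
    ((xs.zip ys).zip zs).map (fun t => f t.1.1 t.1.2 t.2)
      = (List.range m).map (fun j => f (xs.getD j d) (ys.getD j d) (zs.getD j d)) := by
  apply List.ext_getElem
  · simp [hx, hz]; omega
  · intro i h1 h2
    have hi : i < m := by simpa using h2
    have hix : i < xs.length := by omega
    have hiy : i < ys.length := by omega
    have hiz : i < zs.length := by omega
    simp [List.getElem_zip, hix, hiy, hiz, List.getD_eq_getElem?_getD]

-- The rotated row reads index (j+1) mod m.
theorem pv_rot_getD {α : Type} (d : α) (r0 : List α) (j : Nat) (hj : j < r0.length) :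
    (r0.drop 1 ++ r0.take 1).getD j d = r0.getD ((j + 1) % r0.length) d := by
  have hlen : (r0.drop 1).length = r0.length - 1 := by simp
  by_cases hlast : j + 1 < r0.length
  · have hmod : (j + 1) % r0.length = j + 1 := Nat.mod_eq_of_lt hlast
    rw [hmod, List.getD_eq_getElem?_getD, List.getElem?_append_left (by omega),
      List.getElem?_drop, List.getD_eq_getElem?_getD, Nat.add_comm]
  · have hj1 : j = r0.length - 1 := by omega
    have hpos : 0 < r0.length := by omega
    have hmod : (j + 1) % r0.length = 0 := by
      rw [hj1, Nat.sub_add_cancel hpos, Nat.mod_self]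
    rw [hmod, List.getD_eq_getElem?_getD, List.getElem?_append_right (by omega), hlen, hj1]
    simp [hpos, List.getD_eq_getElem?_getD]

-- Taking a prefix does not change reads inside it.
theorem pv_take_getD {α : Type} (d : α) (l : List α) (m j : Nat)
    (hj : j < m) (hm : m ≤ l.length) :
    (l.take m).getD j d = l.getD j d := by
  rw [List.getD_eq_getElem?_getD, List.getElem?_take, if_pos hj, List.getD_eq_getElem?_getD]

-- The algebraic identity behind B: (p-q)×(p-r) = p×q + q×r + r×p, for a 3-vector p.
theorem pv_normal_eq (p q r : List Int) (hp : p.length = 3) :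
    CrossProduct (VectorSubstruction p q) (VectorSubstruction p r) = pvNormal p q r := by
  have hsub : ∀ w : List Int, VectorSubstruction p w
      = (List.range 3).map (fun i => p.getD i 0 - w.getD i 0) := by
    intro w
    unfold VectorSubstruction
    rw [pv_foldl_range_set (fun i _ => p.getD i 0 - w.getD i 0) 0 p.length
        (List.replicate p.length 0) (by simp), hp]
    simp
  match p, hp with
  | [p0, p1, p2], _ =>
    rw [hsub q, hsub r]
    simp only [pvNormal, pvCross, CrossProduct, List.range_succ, List.range_zero]
    simp [List.replicate]
    refine ⟨by ring, by ring, by ring⟩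

-- ===== VERDICT (by name: the statement is the Claim_ definition above) =====
theorem returnVN_spec : Claim_equal_returnVN := by
  intro v _ hpre
  unfold Spec_returnVN
  obtain ⟨hne, hshape⟩ := hpre
  set n := v.length with hn
  set cols := (v.getD 0 []).length with hcols
  -- A as a double map
  have hA : returnVN v
      = (List.range (n - 1)).map (fun i => (List.range cols).map (fun j =>
          CrossProduct
            (VectorSubstruction ((v.getD i []).getD j []) ((v.getD (i+1) []).getD j []))
            (VectorSubstruction ((v.getD i []).getD j [])
              ((v.getD i []).getD (if j = cols - 1 then 0 else j + 1) [])))) := by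
    unfold returnVN
    simp only [← hcols, ← hn]
    have hstep : (fun (vn : List (List (List Int))) (i : Nat) =>
        (List.range cols).foldl (fun vn j =>
          if j = cols - 1 then
            vn.set i ((vn.getD i []).set j (CrossProduct
              (VectorSubstruction ((v.getD i []).getD j []) ((v.getD (i+1) []).getD j []))
              (VectorSubstruction ((v.getD i []).getD j []) ((v.getD i []).getD 0 []))))
          else
            vn.set i ((vn.getD i []).set j (CrossProduct
              (VectorSubstruction ((v.getD i []).getD j []) ((v.getD (i+1) []).getD j []))
              (VectorSubstruction ((v.getD i []).getD j []) ((v.getD i []).getD (j+1) []))))) vn)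
        = (fun (vn : List (List (List Int))) (i : Nat) =>
            vn.set i ((List.range cols).foldl (fun r j =>
              r.set j (CrossProduct
                (VectorSubstruction ((v.getD i []).getD j []) ((v.getD (i+1) []).getD j []))
                (VectorSubstruction ((v.getD i []).getD j [])
                  ((v.getD i []).getD (if j = cols - 1 then 0 else j + 1) []))))
              (vn.getD i []))) := by
      funext vn i
      have hfn : (fun (vn' : List (List (List Int))) (j : Nat) =>
          if j = cols - 1 then
            vn'.set i ((vn'.getD i []).set j (CrossProduct
              (VectorSubstruction ((v.getD i []).getD j []) ((v.getD (i+1) []).getD j []))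
              (VectorSubstruction ((v.getD i []).getD j []) ((v.getD i []).getD 0 []))))
          else
            vn'.set i ((vn'.getD i []).set j (CrossProduct
              (VectorSubstruction ((v.getD i []).getD j []) ((v.getD (i+1) []).getD j []))
              (VectorSubstruction ((v.getD i []).getD j []) ((v.getD i []).getD (j+1) [])))))
          = (fun (vn' : List (List (List Int))) (j : Nat) =>
              vn'.set i ((vn'.getD i []).set j (CrossProduct
                (VectorSubstruction ((v.getD i []).getD j []) ((v.getD (i+1) []).getD j []))
                (VectorSubstruction ((v.getD i []).getD j [])
                  ((v.getD i []).getD (if j = cols - 1 then 0 else j + 1) []))))) := by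
        funext vn' j
        by_cases hx : j = cols - 1 <;> simp [hx]
      rw [hfn]
      exact pv_foldl_set_at i ([] : List (List Int))
        (fun r j => r.set j (CrossProduct
          (VectorSubstruction ((v.getD i []).getD j []) ((v.getD (i+1) []).getD j []))
          (VectorSubstruction ((v.getD i []).getD j [])
            ((v.getD i []).getD (if j = cols - 1 then 0 else j + 1) [])))) (List.range cols) vn
    rw [hstep,
      pv_foldl_range_set
        (fun i r => (List.range cols).foldl (fun r j =>
          r.set j (CrossProduct
            (VectorSubstruction ((v.getD i []).getD j []) ((v.getD (i+1) []).getD j []))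
            (VectorSubstruction ((v.getD i []).getD j [])
              ((v.getD i []).getD (if j = cols - 1 then 0 else j + 1) [])))) r)
        ([] : List (List Int)) (n - 1)
        (List.replicate (n - 1) (List.replicate cols (List.replicate 3 (0:Int)))) (by simp)]
    rw [List.drop_replicate]
    simp only [Nat.sub_self, List.replicate_zero, List.append_nil]
    apply List.map_congr_left
    intro i hi
    rw [List.mem_range] at hi
    have hgetD : (List.replicate (n - 1) (List.replicate cols (List.replicate 3 (0:Int)))).getD i
        ([] : List (List Int)) = List.replicate cols (List.replicate 3 (0:Int)) := by
      rw [List.getD_eq_getElem _ _ (by simpa using hi)]; simp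
    rw [hgetD,
      pv_foldl_range_set
        (fun j _ => CrossProduct
          (VectorSubstruction ((v.getD i []).getD j []) ((v.getD (i+1) []).getD j []))
          (VectorSubstruction ((v.getD i []).getD j [])
            ((v.getD i []).getD (if j = cols - 1 then 0 else j + 1) [])))
        ([] : List Int) cols (List.replicate cols (List.replicate 3 (0:Int))) (by simp)]
    simp
  -- B as a double map
  have hB : returnVN_alt v
      = (List.range (n - 1)).map (fun i => (List.range cols).map (fun j =>
          pvNormal ((v.getD i []).getD j []) ((v.getD (i+1) []).getD j [])
            ((v.getD i []).getD ((j + 1) % cols) []))) := by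
    unfold returnVN_alt
    rw [pv_foldl_append_map, pv_zip_tail ([] : List (List Int)) v]
    simp only [← hcols, ← hn, List.map_map, List.nil_append]
    by_cases hn2 : 1 < n
    · obtain ⟨hrows, _, _⟩ := hshape hn2
      apply List.map_congr_left
      intro i hi
      rw [List.mem_range] at hi
      have hi_lt : i < v.length := by omega
      have hrowi_mem : v.getD i [] ∈ v := by
        rw [List.getD_eq_getElem _ _ hi_lt]; exact List.getElem_mem hi_lt
      have hri : cols ≤ (v.getD i []).length := hrows _ hrowi_mem
      have hi1_lt : i + 1 < v.length := by omega
      have hrowi1_mem : v.getD (i+1) [] ∈ v := by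
        rw [List.getD_eq_getElem _ _ hi1_lt]; exact List.getElem_mem hi1_lt
      have hri1 : cols ≤ (v.getD (i+1) []).length := hrows _ hrowi1_mem
      have htl : ((v.getD i []).take cols).length = cols := by
        rw [List.length_take]; omega
      have hrotl : (((v.getD i []).take cols).drop 1 ++ ((v.getD i []).take cols).take 1).length
          = cols := by
        have h := htl
        simp only [List.length_append, List.length_drop, List.length_take] at h ⊢
        omega
      simp only [Function.comp_apply]
      rw [pv_zip3_map ([] : List Int) pvNormal _ _ _ cols htl hri1 hrotl]
      apply List.map_congr_left
      intro j hj
      rw [List.mem_range] at hj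
      have h1 : ((v.getD i []).take cols).getD j [] = (v.getD i []).getD j [] :=
        pv_take_getD [] _ cols j hj hri
      have h2 : (((v.getD i []).take cols).drop 1 ++ ((v.getD i []).take cols).take 1).getD j []
          = (v.getD i []).getD ((j + 1) % cols) [] := by
        rw [pv_rot_getD [] _ j (by omega)]
        rw [htl]
        exact pv_take_getD [] _ cols _ (Nat.mod_lt _ (by omega)) hri
      rw [h1, h2]
    · have hz : n - 1 = 0 := by omega
      rw [hz]; simp
  rw [hA, hB]
  -- pointwise equality using the shape facts from Pre_
  apply List.map_congr_left
  intro i hi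
  rw [List.mem_range] at hi
  apply List.map_congr_left
  intro j hj
  rw [List.mem_range] at hj
  have hn2 : 1 < n := by omega
  obtain ⟨hrows, hmid, _⟩ := hshape hn2
  have hcolspos : 0 < cols := by omega
  have hi_lt : i < v.length := by omega
  have hrowi_mem : v.getD i [] ∈ v := by
    rw [List.getD_eq_getElem _ _ hi_lt]; exact List.getElem_mem hi_lt
  have hrowi_len : cols ≤ (v.getD i []).length := hrows _ hrowi_mem
  have hrowi_dl : v.getD i [] ∈ v.dropLast := by
    have hdl : i < v.dropLast.length := by simp; omega
    have hdle : v.dropLast[i] = v[i] := List.getElem_dropLast hdl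
    rw [List.getD_eq_getElem _ _ hi_lt, ← hdle]
    exact List.getElem_mem hdl
  have hvec3 : ∀ k, k < cols → ((v.getD i []).getD k []).length = 3 := by
    intro k hk
    have hk_lt : k < (v.getD i []).length := by omega
    have hmem : (v.getD i []).getD k [] ∈ (v.getD i []).take cols := by
      have hk_take : k < ((v.getD i []).take cols).length := by rw [List.length_take]; omega
      have hte : ((v.getD i []).take cols)[k] = (v.getD i [])[k] := List.getElem_take
      rw [List.getD_eq_getElem _ _ hk_lt, ← hte]
      exact List.getElem_mem hk_take
    exact hmid _ hrowi_dl _ hmem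
  have hp3 : ((v.getD i []).getD j []).length = 3 := hvec3 j hj
  have hidx : (if j = cols - 1 then 0 else j + 1) = (j + 1) % cols := by
    by_cases hlast : j = cols - 1
    · rw [if_pos hlast, hlast, Nat.sub_add_cancel hcolspos, Nat.mod_self]
    · rw [if_neg hlast, Nat.mod_eq_of_lt (by omega)]
  rw [hidx]
  exact pv_normal_eq _ _ _ hp3
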